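-- pv_equiv track=rewrite | github.com/ida-rnet/RNet | example/training/myclass.py | perm_map
-- ===== SOURCE A (Python) =====
-- def addperm(x,l):
-- 	return [ l[0:i] + [x] + l[i:]  for i in range(len(l)+1) ]
--
-- def perm(l):
-- 	if len(l) == 0:
-- 		return [[]]
-- 	return [x for y in perm(l[1:]) for x in addperm(l[0],y) ]
--
-- def perm_map(l):
-- 	x = [ a for a in range( sum(l) ) ]
-- 	y = []
-- 	for n in range( len(l) ):
-- 		n1 = sum( l[:n] )
-- 		n2 = sum( l[:n+1] )
-- 		if n == 0:
-- 			y = perm( x[n1:n2] )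
-- 		else:
-- 			z = list( y )
-- 			y.clear()
-- 			y = [ a + b for a in z for b in perm( x[n1:n2] ) ]
-- 	return y[1:]
-- ===== SOURCE B (Python) =====
-- def _perm_iter(lst):
--     # iterative permutations: process elements last-to-first, inserting each
--     # into every position of every accumulated permutation
--     acc = [[]]
--     for e in reversed(lst):
--         acc = [p[:i] + [e] + p[i:] for p in acc for i in range(len(p) + 1)]
--     return acc
--
-- def perm_map(l):
--     x = list(range(sum(l)))
--     result = [[]]
--     off = 0
--     for size in l:
--         block = x[off:off + size]
--         off += size
--         result = [a + b for a in result for b in _perm_iter(block)]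
--     return result[1:]
-- ===== Notes on version B (the rewrite author's own statement) =====
-- stated objective: alternative
-- what changed: perm's build-tail-then-insert recursion is replaced by an iterative accumulator that folds the block right-to-left with the same insertion pattern, and perm_map's index-range loop with recomputed prefix sums and a special n==0 branch is replaced by a single fold over the sizes carrying a running offset and starting from [[]].
import Mathlib
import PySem

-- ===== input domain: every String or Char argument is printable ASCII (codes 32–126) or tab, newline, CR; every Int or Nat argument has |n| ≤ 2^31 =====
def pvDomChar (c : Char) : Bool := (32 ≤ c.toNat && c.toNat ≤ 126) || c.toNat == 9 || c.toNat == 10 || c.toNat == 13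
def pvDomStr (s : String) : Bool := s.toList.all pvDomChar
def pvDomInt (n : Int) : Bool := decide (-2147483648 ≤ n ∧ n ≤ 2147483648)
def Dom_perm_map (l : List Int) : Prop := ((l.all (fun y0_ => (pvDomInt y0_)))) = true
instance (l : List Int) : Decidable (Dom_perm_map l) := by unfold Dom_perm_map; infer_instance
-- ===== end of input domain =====

-- B replaces A's recursive perm by an iterative right-to-left insertion fold and A's
-- index-range loop (with recomputed prefix sums and an n==0 special case) by a single
-- fold over the sizes carrying a running offset; objective: alternative decomposition.

-- ===== PORT A =====
-- addperm(x,l): range(len(l)+1) yields nonnegative ints, ported as List.range with cast indices;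
-- the slices l[0:i], l[i:] are PySem slices (exact).
def addperm (x : Int) (l : List Int) : List (List Int) :=
  (List.range (l.length + 1)).map (fun (i : Nat) =>
    PySem.List.slice l (some 0) (some (i : Int)) ++ [x] ++ PySem.List.slice l (some (i : Int)) none)

-- perm(l): structural recursion; l[1:] is the tail, l[0] the head (l nonempty in that branch).
def perm : List Int → List (List Int)
  | [] => [[]]
  | h :: t => (perm t).flatMap (fun y => addperm h y)

-- perm_map: x = list(range(sum(l))); loop 'for n in range(len(l))' ported as a foldl over
-- List.range (n is nonnegative, so l[:n] = take n, exact); z = list(y); y.clear() is the copy z := y.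
def perm_map (l : List Int) : List (List Int) :=
  let x := PySem.List.pyRange 0 l.sum 1
  let y : List (List Int) :=
    (List.range l.length).foldl (fun y n =>
      let n1 := (l.take n).sum
      let n2 := (l.take (n + 1)).sum
      if n = 0 then
        perm (PySem.List.slice x (some n1) (some n2))
      else
        let z := y
        z.flatMap (fun a => (perm (PySem.List.slice x (some n1) (some n2))).map (fun b => a ++ b))) []
  PySem.List.slice y (some 1) none

-- ===== PORT B =====
-- _perm_iter: fold over reversed(lst); p[:i]/p[i:] with i from range(len(p)+1) are take/drop (i ≥ 0, exact).
def permIter (lst : List Int) : List (List Int) :=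
  lst.reverse.foldl (fun acc e =>
    acc.flatMap (fun p => (List.range (p.length + 1)).map (fun i =>
      p.take i ++ [e] ++ p.drop i))) [[]]

-- perm_map (B): single fold over the sizes with state (off, result).
def perm_map_alt (l : List Int) : List (List Int) :=
  let x := PySem.List.pyRange 0 l.sum 1
  let st := l.foldl (fun (st : Int × List (List Int)) size =>
    let block := PySem.List.slice x (some st.1) (some (st.1 + size))
    (st.1 + size, st.2.flatMap (fun a => (permIter block).map (fun b => a ++ b)))) (0, [[]])
  PySem.List.slice st.2 (some 1) none

-- ===== PRECONDITION & SPEC =====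
def Spec_perm_map (l : List Int) (out : List (List Int)) : Prop := out = perm_map_alt l
instance (l : List Int) (out : List (List Int)) : Decidable (Spec_perm_map l out) := by unfold Spec_perm_map; infer_instance

-- ===== CLAIM (what is proved, stated in full; the proofs are below) =====
def Claim_equal_perm_map : Prop := ∀ (l : List Int), Dom_perm_map l → Spec_perm_map l (perm_map l)

-- ===== LEMMAS AND PROOFS =====

theorem addperm_eq (x : Int) (p : List Int) :
    addperm x p = (List.range (p.length + 1)).map (fun i => p.take i ++ [x] ++ p.drop i) := by
  unfold addperm
  refine List.map_congr_left ?_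
  intro i _
  simp [PySem.List.slice_to_natCast, PySem.List.slice_from_natCast]

theorem permIter_eq_perm (lst : List Int) : permIter lst = perm lst := by
  unfold permIter
  induction lst with
  | nil => simp [perm]
  | cons h t ih =>
      simp only [List.reverse_cons, List.foldl_append, List.foldl_cons, List.foldl_nil] at *
      rw [ih, perm]
      simp only [addperm_eq]

-- proof-side names for the two loop bodies (definitionally the ports' lambdas)
def fA (x : List Int) (l : List Int) (y : List (List Int)) (n : Nat) : List (List Int) :=
  if n = 0 then
    perm (PySem.List.slice x (some (l.take n).sum) (some (l.take (n + 1)).sum))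
  else
    y.flatMap (fun a =>
      (perm (PySem.List.slice x (some (l.take n).sum) (some (l.take (n + 1)).sum))).map
        (fun b => a ++ b))

def gB (x : List Int) (st : Int × List (List Int)) (size : Int) : Int × List (List Int) :=
  (st.1 + size, st.2.flatMap (fun a =>
    (perm (PySem.List.slice x (some st.1) (some (st.1 + size)))).map (fun b => a ++ b)))

theorem fA_append (x t : List Int) (s : Int) (m : Nat) (hm : m < t.length)
    (acc : List (List Int)) : fA x (t ++ [s]) acc m = fA x t acc m := by
  unfold fA
  rw [List.take_append_of_le_length (Nat.le_of_lt hm), List.take_append_of_le_length hm]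

theorem gB_off (x l : List Int) (off0 : Int) (res0 : List (List Int)) :
    (l.foldl (fun (st : Int × List (List Int)) size =>
      (st.1 + size, st.2.flatMap (fun a =>
        (perm (PySem.List.slice x (some st.1) (some (st.1 + size)))).map (fun b => a ++ b))))
      (off0, res0)).1 = off0 + l.sum := by
  induction l generalizing off0 res0 with
  | nil => simp
  | cons s t ih => simp [List.foldl_cons, ih, add_assoc]

theorem main_loop_eq (x l : List Int) (hl : l ≠ []) :
    (List.range l.length).foldl (fA x l) [] = (l.foldl (gB x) (0, [[]])).2 := by
  revert hl
  induction l using List.reverseRecOn with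
  | nil => exact fun hl => absurd rfl hl
  | append_singleton t s ih =>
      intro _
      by_cases ht : t = []
      · subst ht
        simp [List.range_succ, fA, gB]
      · have hn : t.length ≠ 0 := fun h => ht (List.eq_nil_of_length_eq_zero h)
        rw [show (t ++ [s]).length = t.length + 1 from by simp, List.range_succ,
          List.foldl_concat, List.foldl_concat,
          PySem.List.foldl_congr_mem (List.range t.length) (fA x (t ++ [s])) (fA x t) []
            (fun acc m hm => fA_append x t s m (List.mem_range.mp hm) acc),
          ih ht]
        unfold fA gB
        rw [if_neg hn, gB_off,
          show (t ++ [s]).take t.length = t from List.take_left,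
          show (t ++ [s]).take (t.length + 1) = t ++ [s] from List.take_of_length_le (by simp)]
        simp [List.sum_append]

-- ===== VERDICT (by name: the statement is the Claim_ definition above) =====
theorem perm_map_spec : Claim_equal_perm_map := by
  intro l _
  unfold Spec_perm_map perm_map perm_map_alt
  simp only [permIter_eq_perm]
  by_cases hl : l = []
  · subst hl; rfl
  · show PySem.List.slice
        ((List.range l.length).foldl (fA (PySem.List.pyRange 0 l.sum 1) l) []) (some 1) none
      = PySem.List.slice
        ((l.foldl (gB (PySem.List.pyRange 0 l.sum 1)) (0, [[]])).2) (some 1) none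
    exact congrArg (fun y => PySem.List.slice y (some 1) none) (main_loop_eq _ l hl)
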